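-- pv_equiv track=rewrite | github.com/barryptak/AdventOfCode | 2023/13.py | find_vertical_reflection
-- ===== SOURCE A (Python) =====
-- def get_all_reflections(row):
--     reflections = []
--     for x in range(len(row) - 1):
--         match = True
--         for x1, x2 in zip(row[x::-1], row[x+1:]):
--             if x1 != x2:
--                 match = False
--                 break
--
--         if match:
--             reflections.append(x + 1)
--
--     return reflections
--
-- def find_vertical_reflection(terrain):
--     reflections_set = set(i for i in range(1, len(terrain[0]) + 1))
--     for row in terrain:
--         reflections = get_all_reflections(row)
--         reflections_set.intersection_update(reflections)
--         if len(reflections_set) == 0: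
--             return []
--
--     return list(reflections_set)
-- ===== SOURCE B (Python) =====
-- def find_vertical_reflection(terrain):
--     width = len(terrain[0])
--
--     def ok(row, p):
--         m = min(p, len(row) - p)
--         return m > 0 and row[p - m:p] == row[p:p + m][::-1]
--
--     return [p for p in range(1, width) if all(ok(row, p) for row in terrain)]
-- ===== Notes on version B (the rewrite author's own statement) =====
-- stated objective: simpler
-- what changed: Replaces the per-row per-char zip scan collected into a mutable set intersection (and the hash-ordered list(set) result) with a single comprehension over candidate axes that tests each axis on every row by one minimal-overlap slice comparison, returning axes in ascending order.
-- outside the precondition, e.g. on find_vertical_reflection(['#..##..##']): A returns [8, 2, 4, 6], B returns [2, 4, 6, 8]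
import Mathlib
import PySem

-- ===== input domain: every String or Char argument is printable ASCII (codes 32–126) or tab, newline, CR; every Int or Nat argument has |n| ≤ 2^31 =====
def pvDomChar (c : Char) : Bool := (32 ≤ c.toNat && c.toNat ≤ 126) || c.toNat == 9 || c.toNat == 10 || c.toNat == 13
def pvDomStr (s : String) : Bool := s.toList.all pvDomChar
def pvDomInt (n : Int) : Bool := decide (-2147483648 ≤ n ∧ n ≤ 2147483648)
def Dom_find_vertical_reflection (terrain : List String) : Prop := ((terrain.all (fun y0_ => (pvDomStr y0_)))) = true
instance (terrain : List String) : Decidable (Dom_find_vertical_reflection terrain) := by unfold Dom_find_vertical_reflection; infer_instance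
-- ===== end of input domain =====

-- B replaces A's per-row zip scan collected into a mutable set intersection (and its hash-ordered
-- list(set) result) with one comprehension over candidate axes, each tested per row by a single
-- minimal-overlap slice comparison; objective: simpler.

-- ===== PORT A =====
-- inner loop 'for x1, x2 in zip(row[x::-1], row[x+1:]): if x1 != x2: match = False; break'
def pairsMatchA : List (Char × Char) → Bool
  | [] => true
  | (x1, x2) :: rest => if x1 ≠ x2 then false else pairsMatchA rest

def get_all_reflections (row : String) : List Int :=
  (PySem.List.pyRange 0 (PySem.Str.len row - 1) 1).foldl
    (fun reflections x =>
      if pairsMatchA ((((PySem.List.slice? row.toList (some x) none (-1)).getD []).zip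
                        (PySem.List.slice row.toList (some (x + 1)) none)))
      then reflections ++ [x + 1] else reflections) []

-- 'for row in terrain: ... if len(reflections_set) == 0: return []' as structural recursion
def fvrLoopA (rows : List String) (reflections_set : PySem.Set Int) : List Int :=
  match rows with
  | [] => reflections_set
  | row :: rest =>
      let s' := PySem.Set.inter reflections_set (get_all_reflections row)
      if PySem.Set.len s' = 0 then [] else fvrLoopA rest s'

def find_vertical_reflection (terrain : List String) : List Int :=
  -- 'terrain[0]' raises IndexError on []: such inputs are excluded by Pre_; total form via getD
  let first := (PySem.List.pyGet? terrain 0).getD ""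
  fvrLoopA terrain (PySem.Set.ofList (PySem.List.pyRange 1 (PySem.Str.len first + 1) 1))

-- ===== PORT B =====
def ok_alt (row : String) (p : Int) : Bool :=
  let m := min p (PySem.Str.len row - p)
  decide (0 < m) &&
    (PySem.List.slice row.toList (some (p - m)) (some p) ==
      (PySem.List.slice? (PySem.List.slice row.toList (some p) (some (p + m))) none none (-1)).getD [])

def find_vertical_reflection_alt (terrain : List String) : List Int :=
  let width := PySem.Str.len ((PySem.List.pyGet? terrain 0).getD "")
  (PySem.List.pyRange 1 width 1).filter (fun p => terrain.all (fun row => ok_alt row p))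

-- ===== PRECONDITION & SPEC =====
-- helper for Pre_: 'p is a reflection axis of row' (mirror equality on the overlap, axis inside the row)
def pvAxis (row : String) (p : Nat) : Bool :=
  decide (p < row.toList.length) &&
    ((row.toList.take p).reverse.isPrefixOf (row.toList.drop p) ||
      (row.toList.drop p).isPrefixOf (row.toList.take p).reverse)

-- Pre_ excludes the empty terrain, on which A raises IndexError, and terrains with two or more common
-- reflection axes, on which the order of A's 'list(reflections_set)' is an accidental artefact of
-- CPython's hash-table iteration order (B returns the axes in ascending order there).
def Pre_find_vertical_reflection (terrain : List String) : Prop :=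
  terrain ≠ [] ∧
  (List.range terrain.headI.toList.length).countP
      (fun p => decide (0 < p) && terrain.all (fun row => pvAxis row p)) ≤ 1
instance (terrain : List String) : Decidable (Pre_find_vertical_reflection terrain) := by
  unfold Pre_find_vertical_reflection; infer_instance

def pvWitness_find_vertical_reflection : List String := ["##.", "##."]

def Spec_find_vertical_reflection (terrain : List String) (out : List Int) : Prop := out = find_vertical_reflection_alt terrain
instance (terrain : List String) (out : List Int) : Decidable (Spec_find_vertical_reflection terrain out) := by unfold Spec_find_vertical_reflection; infer_instance

-- ===== CLAIM (what is proved, stated in full; the proofs are below) =====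
def Claim_equal_find_vertical_reflection : Prop := ∀ (terrain : List String), Dom_find_vertical_reflection terrain → Pre_find_vertical_reflection terrain → Spec_find_vertical_reflection terrain (find_vertical_reflection terrain)

-- ===== LEMMAS AND PROOFS =====
theorem pairsMatchA_eq (a b : List Char) :
    pairsMatchA (a.zip b) = decide (a.take b.length = b.take a.length) := by
  induction a generalizing b with
  | nil => simp [pairsMatchA]
  | cons x xs ih =>
    cases b with
    | nil => simp [pairsMatchA]
    | cons y ys =>
      simp only [List.zip_cons_cons, pairsMatchA, List.length_cons, List.take_succ_cons]
      by_cases h : x = y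
      · subst h; simp [ih]
      · simp [h]

-- Lemma B: the reversed-prefix slice

theorem filterMap_range_rev (xs : List Char) (x : Nat) (h : x < xs.length) :
    List.filterMap (fun k => xs[(x - k : Nat)]?) (List.range (x+1)) = (xs.take (x+1)).reverse := by
  induction x with
  | zero =>
    cases xs with
    | nil => simp at h
    | cons a l => simp [List.range_succ]
  | succ n ih =>
    rw [List.range_succ_eq_map]
    have h1 : n < xs.length := by omega
    have : List.filterMap (fun k => xs[(n + 1 - k : Nat)]?) (List.map (· + 1) (List.range (n+1)))
        = List.filterMap (fun k => xs[(n - k : Nat)]?) (List.range (n+1)) := by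
      rw [List.filterMap_map]
      apply List.filterMap_congr
      intro k hk
      simp only [Function.comp]
      congr 1
      omega
    simp only [List.filterMap_cons]
    rw [this, ih h1]
    have hget : xs[(n + 1 - 0 : Nat)]? = some (xs[n+1]'h) := by
      simp [List.getElem?_eq_getElem h]
    rw [hget]
    have htake : List.take (n+1+1) xs = List.take (n+1) xs ++ [xs[n+1]'h] := by
      rw [List.take_add_one, List.getElem?_eq_getElem h]; simp
    rw [htake, List.reverse_append]
    simp

theorem slice?_rev_from (xs : List Char) (x : Nat) (h : x < xs.length) :
    PySem.List.slice? xs (some (x:Int)) none (-1) = some ((xs.take (x+1)).reverse) := by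
  rw [PySem.List.slice?]
  have hne : (-1 : Int) ≠ 0 := by norm_num
  rw [if_neg hne]
  simp only [PySem.List.sliceIndices]
  norm_num
  have hx : min (x : Int) ((xs.length : Int) - 1) = (x : Int) := by omega
  rw [hx]
  rw [← filterMap_range_rev xs x h]
  apply List.filterMap_congr
  intro k hk
  simp at hk
  congr 1
  omega

theorem refl_filter (row : String) :
    get_all_reflections row =
      ((PySem.List.pyRange 0 (PySem.Str.len row - 1) 1).filter
        (fun x => pairsMatchA ((((PySem.List.slice? row.toList (some x) none (-1)).getD []).zip
                        (PySem.List.slice row.toList (some (x + 1)) none))))).map (· + 1) := by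
  rw [get_all_reflections, PySem.List.foldl_append_if]
  simp

theorem contains_refl_eq_ok (row : String) (p : Int) (hp : 1 ≤ p) :
    (get_all_reflections row).contains p = ok_alt row p := by
  obtain ⟨natP, rfl⟩ : ∃ k : Nat, p = (k : Int) := ⟨p.toNat, by omega⟩
  have hlen : PySem.Str.len row = (row.toList.length : Int) := by
    simp [PySem.Str.len]
  by_cases hlt : natP < row.toList.length
  · -- 1 ≤ p < len: both sides are the mirror test
    -- LHS reduces to the inner condition at x = p - 1
    have hx : ((natP : Int) - 1) = ((natP - 1 : Nat) : Int) := by omega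
    have hx1 : (natP - 1 : Nat) < row.toList.length := by omega
    have hmem : ((natP : Int) - 1) ∈ PySem.List.pyRange 0 (PySem.Str.len row - 1) 1 := by
      rw [PySem.List.mem_pyRange_one, hlen]; omega
    set cs := row.toList with hcs
    set n := cs.length with hn
    obtain ⟨mN, hmN⟩ : ∃ m : Nat, min natP (n - natP) = m := ⟨_, rfl⟩
    have hmleP : mN ≤ natP := by rw [← hmN]; exact Nat.min_le_left _ _
    have hmleD : mN ≤ n - natP := by rw [← hmN]; exact Nat.min_le_right _ _
    have hp1 : 1 ≤ natP := by omega
    have hmN1 : 1 ≤ mN := by omega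
    rw [Bool.eq_iff_iff]
    -- LHS: membership in the mapped filter is the inner condition at x = p - 1
    have hL : ((get_all_reflections row).contains (natP : Int) = true) ↔
        (pairsMatchA ((((PySem.List.slice? cs (some ((natP : Int) - 1)) none (-1)).getD []).zip
          (PySem.List.slice cs (some (((natP : Int) - 1) + 1)) none))) = true) := by
      rw [List.contains_eq_mem, refl_filter]
      simp only [decide_eq_true_eq, List.mem_map, List.mem_filter]
      constructor
      · rintro ⟨x, ⟨hxr, hxc⟩, hxp⟩
        have : x = (natP : Int) - 1 := by omega
        subst this; exact hxc
      · intro hc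
        exact ⟨(natP : Int) - 1, ⟨hmem, hc⟩, by omega⟩
    rw [hL]
    -- evaluate both sides to take/drop form
    rw [hx, slice?_rev_from cs (natP - 1) hx1]
    have hsucc : natP - 1 + 1 = natP := by omega
    have hfrom : (((natP - 1 : Nat) : Int) + 1) = ((natP : Nat) : Int) := by omega
    rw [hsucc, hfrom, PySem.List.slice_from cs (by omega : (0:Int) ≤ (natP : Int))]
    simp only [Option.getD_some, Int.toNat_natCast]
    rw [pairsMatchA_eq]
    -- RHS
    rw [ok_alt]
    simp only [hlen, ← hcs]
    clear_value n cs
    have hm : min ((natP : Int)) ((n : Int) - (natP : Int)) = (mN : Int) := by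
      rcases le_total ((natP : Int)) ((n : Int) - (natP : Int)) with h | h
      · rw [min_eq_left h]; omega
      · rw [min_eq_right h]; omega
    rw [hm]
    have h0m : (0 : Int) < (mN : Int) := by omega
    rw [decide_eq_true h0m, Bool.true_and]
    have hs1 : PySem.List.slice cs (some ((natP : Int) - (mN : Int))) (some (natP : Int))
        = (cs.drop (natP - mN)).take mN := by
      rw [PySem.List.slice_toNat cs (a := (natP : Int) - (mN : Int)) (b := (natP : Int))
        (Int.sub_nonneg.mpr (by exact_mod_cast hmleP)) (Int.natCast_nonneg natP)]
      rw [Int.toNat_sub natP mN, Int.toNat_natCast]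
      rw [Nat.sub_sub_self hmleP]
    have hs2 : PySem.List.slice cs (some (natP : Int)) (some ((natP : Int) + (mN : Int)))
        = (cs.drop natP).take mN := by
      rw [PySem.List.slice_toNat cs (a := (natP : Int)) (b := (natP : Int) + (mN : Int))
        (Int.natCast_nonneg natP) (by positivity)]
      rw [← Nat.cast_add, Int.toNat_natCast, Int.toNat_natCast, Nat.add_sub_cancel_left]
    rw [hs1, hs2, PySem.List.slice?_none_none_neg_one, Option.getD_some]
    rw [beq_iff_eq, decide_eq_true_eq]
    -- the two mirror equations are equivalent
    have hlenT : (cs.take natP).length = natP := by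
      rw [List.length_take]; omega
    have hlenD : (cs.drop natP).length = n - natP := by
      rw [List.length_drop, hn]
    rw [hlenD, List.length_reverse, hlenT]
    constructor
    · intro hEq
      have e1 : ((cs.take natP).reverse).take (n - natP) = ((cs.take natP).reverse).take mN := by
        rw [List.take_eq_take_iff]; simp only [List.length_reverse, hlenT]; omega
      have e2 : (cs.drop natP).take natP = (cs.drop natP).take mN := by
        rw [List.take_eq_take_iff]; simp only [hlenD]; omega
      rw [e1, e2] at hEq
      rw [List.take_reverse, hlenT] at hEq
      rw [List.drop_take] at hEq
      have e3 : natP - (natP - mN) = mN := by omega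
      rw [e3] at hEq
      rw [List.reverse_eq_iff] at hEq
      exact hEq
    · intro hEq
      have e1 : ((cs.take natP).reverse).take (n - natP) = ((cs.take natP).reverse).take mN := by
        rw [List.take_eq_take_iff]; simp only [List.length_reverse, hlenT]; omega
      have e2 : (cs.drop natP).take natP = (cs.drop natP).take mN := by
        rw [List.take_eq_take_iff]; simp only [hlenD]; omega
      rw [e1, e2, List.take_reverse, hlenT, List.drop_take]
      have e3 : natP - (natP - mN) = mN := by omega
      rw [e3, List.reverse_eq_iff]
      exact hEq
  · -- p ≥ len: axis outside the row, both sides false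
    have hL : (get_all_reflections row).contains (natP : Int) = false := by
      rw [List.contains_eq_mem, refl_filter]
      simp only [decide_eq_false_iff_not, List.mem_map, List.mem_filter]
      rintro ⟨x, ⟨hxr, -⟩, hxp⟩
      rw [PySem.List.mem_pyRange_one, hlen] at hxr
      omega
    have hR : ok_alt row (natP : Int) = false := by
      rw [ok_alt]
      simp only [hlen]
      have hm : ¬ (0 : Int) < min (natP : Int) ((row.toList.length : Int) - (natP : Int)) := by
        omega
      rw [decide_eq_false hm, Bool.false_and]
    rw [hL, hR]

theorem all_congr_mem {α : Type} (l : List α) {f g : α → Bool}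
    (h : ∀ x ∈ l, f x = g x) : l.all f = l.all g := by
  induction l with
  | nil => rfl
  | cons a t ih =>
    rw [List.all_cons, List.all_cons, h a (by simp), ih (fun x hx => h x (by simp [hx]))]

theorem fvrLoopA_eq (rows : List String) (s : List Int) :
    fvrLoopA rows s
      = s.filter (fun p => rows.all (fun r => (get_all_reflections r).contains p)) := by
  induction rows generalizing s with
  | nil => simp [fvrLoopA]
  | cons row rest ih =>
    rw [fvrLoopA]
    by_cases h : PySem.Set.len (PySem.Set.inter s (get_all_reflections row)) = 0
    · rw [if_pos h]
      have hnil : PySem.Set.inter s (get_all_reflections row) = [] := by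
        rw [PySem.Set.len, Nat.cast_eq_zero, List.length_eq_zero_iff] at h
        exact h
      symm
      rw [List.filter_eq_nil_iff]
      intro p hp
      have hcf : (get_all_reflections row).contains p = false := by
        by_contra hc
        have hmem : p ∈ PySem.Set.inter s (get_all_reflections row) := by
          rw [PySem.Set.inter]
          exact List.mem_filter.mpr ⟨hp, by simpa using hc⟩
        rw [hnil] at hmem
        simp at hmem
      rw [List.all_cons, hcf, Bool.false_and]
      exact Bool.false_ne_true
    · rw [if_neg h, ih]
      rw [PySem.Set.inter, List.filter_filter]
      apply List.filter_congr
      intro p hp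
      simp [Bool.and_comm]

theorem main_eq (terrain : List String) (hne : terrain ≠ []) :
    find_vertical_reflection terrain = find_vertical_reflection_alt terrain := by
  obtain ⟨t0, rest, rfl⟩ : ∃ a l, terrain = a :: l := by
    cases terrain with
    | nil => exact absurd rfl hne
    | cons a l => exact ⟨a, l, rfl⟩
  have hfirst : (PySem.List.pyGet? (t0 :: rest) 0).getD "" = t0 := by
    simp [PySem.List.pyGet?, PySem.List.pyIdx?]
  rw [find_vertical_reflection, find_vertical_reflection_alt]
  simp only [hfirst]
  rw [PySem.Set.ofList_eq_self_of_nodup _ (PySem.List.nodup_pyRange_one _ _)]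
  rw [fvrLoopA_eq]
  obtain ⟨n0, hn0⟩ : ∃ k : Nat, PySem.Str.len t0 = (k : Int) := ⟨t0.toList.length, by simp [PySem.Str.len]⟩
  rw [hn0]
  by_cases h0 : n0 = 0
  · subst h0
    rw [PySem.List.pyRange_one_eq_nil (by norm_num), PySem.List.pyRange_one_eq_nil (by norm_num)]
    rfl
  · have h1 : (1 : Int) ≤ (n0 : Int) := by omega
    rw [PySem.List.pyRange_one_succ_right h1, List.filter_append]
    have hok0 : ok_alt t0 (n0 : Int) = false := by
      rw [ok_alt]
      have hm : min ((n0 : Int)) (PySem.Str.len t0 - (n0 : Int)) = 0 := by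
        rw [hn0]; omega
      rw [hm]
      norm_num
    have hF : ((t0 :: rest).all (fun r => (get_all_reflections r).contains ((n0 : Int)))) = false := by
      rw [List.all_cons, contains_refl_eq_ok t0 _ h1, hok0, Bool.false_and]
    have hsing : List.filter (fun p => (t0 :: rest).all (fun r => (get_all_reflections r).contains p)) [(n0 : Int)] = [] := by
      simp only [List.filter_cons, List.filter_nil, hF]
      rfl
    rw [hsing, List.append_nil]
    apply List.filter_congr
    intro p hp
    rw [PySem.List.mem_pyRange_one] at hp
    apply all_congr_mem
    intro r hr
    exact contains_refl_eq_ok r p hp.1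

-- ===== VERDICT (by name: the statement is the Claim_ definition above) =====
theorem find_vertical_reflection_spec : Claim_equal_find_vertical_reflection := by
  intro terrain _hdom hpre
  unfold Spec_find_vertical_reflection
  exact main_eq terrain hpre.1
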